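-- pv_equiv track=rewrite | github.com/NJAPe/advent-of-code-2018 | advent_of_code/puzzle_12.py | calc_sum_after_x_generations
-- ===== SOURCE A (Python) =====
-- def get_spread_pattern(spread_input):
--     spread_pattern = set()
--     for line in spread_input:
--         if line == "":
--             continue
--         if line[0] == "." or line[0] == "#":
--             pattern = line[0:5]
--             result = line[-1]
--             if result == "#":
--                 spread_pattern.add(pattern)
--     return spread_pattern
--
-- def parse_input(my_input):
--     input_array = my_input.strip().split("\n")
--     start_idx = min(input_array[0].find("."), input_array[0].find("#"))
--     init_state = input_array[0][start_idx:]
--     spread_pattern = get_spread_pattern(input_array)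
--     return init_state, spread_pattern
--
-- def calc_next_gen(curr_pop, spread_pattern, curr_offset):
--     start_idx = curr_pop.find("#")
--     if start_idx < 5:
--         missing = 5 - start_idx
--         curr_pop = missing*"." + curr_pop
--         curr_offset += missing
--     elif start_idx > 5:
--         remove = start_idx - 5
--         curr_pop = curr_pop[remove:]
--         curr_offset -= remove
--     end_idx = curr_pop.rfind("#")
--     num_dots = len(curr_pop) - end_idx - 1
--     if num_dots < 5:
--         add_dots = 5 - num_dots
--         curr_pop += add_dots*"."
--     elif num_dots > 5:
--         remove = num_dots - 5
--         curr_pop = curr_pop[:-remove]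
--     next_pop = ""
--     for idx in range(len(curr_pop)-3):
--         key = curr_pop[idx-2:idx+3]
--         if key in spread_pattern:
--             next_pop += "#"
--         else:
--             next_pop += "."
--     return next_pop, curr_offset
--
-- def calc_sum(state, offset):
--     my_sum = 0
--     for idx, c in enumerate(state):
--         if c == "#":
--             my_sum += idx - offset
--     return my_sum
--
-- def calc_sum_after_x_generations(my_input, num_generations):
--     sums = list()
--     curr_pop, spread_patt = parse_input(my_input)
--
--     diff = 0
--     curr_offset = 0
--     generations = 0
--     for i in range(num_generations):
--         curr_pop, curr_offset = calc_next_gen(curr_pop, spread_patt, curr_offset)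
--         generations += 1
--         sums.append(calc_sum(curr_pop,curr_offset))
--         if i >= 100:
--             diff = sums[i] - sums[i-1]
--             found = True
--             for j in range(100):
--                 temp_diff = sums[i-j] - sums[i-j-1]
--                 if temp_diff != diff:
--                     found = False
--                     break
--             if found:
--                 break
--     if generations == num_generations:
--         return sums[generations - 1]
--     else:
--         return sums[generations-1] + (num_generations - generations)*diff
-- ===== SOURCE B (Python) =====
-- def calc_sum_after_x_generations(my_input, num_generations):
--     lines = my_input.strip().split("\n")
--     first = lines[0]
--     start = min(first.find("."), first.find("#"))
--     init_state = first[start:]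
--     patterns = {line[0:5] for line in lines
--                 if line != "" and (line[0] == "." or line[0] == "#")
--                 and line[-1] == "#"}
--     # sparse state: positions of all non-'.' cells of the current tape
--     cells = {i: c for i, c in enumerate(init_state) if c != "."}
--     rsums = []          # generation sums, newest first
--     diff = 0
--     for i in range(num_generations):
--         live = [p for p, c in cells.items() if c == "#"]
--         nxt = {}
--         if live:
--             lo, hi = min(live), max(live)
--             for p in range(lo - 3, hi + 3):
--                 w = "".join(cells.get(q, ".") for q in range(p - 2, p + 3))
--                 if w in patterns:
--                     nxt[p] = "#"
--         cells = nxt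
--         rsums = [sum(cells)] + rsums
--         if i >= 100:
--             ds = [x - y for x, y in zip(rsums[:101], rsums[1:])]
--             diff = ds[0]
--             if all(d == diff for d in ds[:100]):
--                 break
--     if len(rsums) == num_generations:
--         return rsums[0]
--     return rsums[0] + (num_generations - len(rsums)) * diff
-- ===== Notes on version B (the rewrite author's own statement) =====
-- stated objective: alternative
-- what changed: B keeps the plant population as a sparse dict of cell positions (candidates scanned from min(live)-3 to max(live)+2, windows joined from dict lookups, generation sum = sum of keys) instead of A's dot-padded string with a moving offset re-trimmed every generation, and it records sums newest-first, detecting stabilization by comparing the first 100 pairwise differences of that list instead of A's indexed 100-iteration scan.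
import Mathlib
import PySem

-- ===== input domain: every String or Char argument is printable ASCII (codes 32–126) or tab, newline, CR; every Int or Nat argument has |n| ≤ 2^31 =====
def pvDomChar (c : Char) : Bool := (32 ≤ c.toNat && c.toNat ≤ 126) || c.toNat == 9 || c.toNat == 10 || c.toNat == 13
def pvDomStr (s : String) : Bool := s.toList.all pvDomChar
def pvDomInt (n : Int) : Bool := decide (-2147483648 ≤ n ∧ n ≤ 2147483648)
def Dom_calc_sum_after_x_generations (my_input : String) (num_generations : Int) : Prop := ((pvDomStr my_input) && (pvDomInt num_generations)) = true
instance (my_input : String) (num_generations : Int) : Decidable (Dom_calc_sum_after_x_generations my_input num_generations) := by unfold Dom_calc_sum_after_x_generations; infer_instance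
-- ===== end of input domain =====

-- B replaces A's padded-string-plus-offset population by a sparse dict of cell
-- positions (scanning min(live)-3 .. max(live)+2 each generation) and records the
-- generation sums newest-first, checking stabilization on the pairwise differences
-- of that list; objective: alternative representation.

-- ===== PORT A =====
def pvGspStep (sp : PySem.Set (List Char)) (line : List Char) : PySem.Set (List Char) :=
  match line with
  | [] => sp
  | c :: _ =>
    if c = '.' ∨ c = '#' then
      let pattern := PySem.List.slice line (some 0) (some 5)
      let result := PySem.List.pyGetD line (-1) ' '
      if result = '#' then PySem.Set.add sp pattern else sp
    else sp

def get_spread_pattern (spread_input : List (List Char)) : PySem.Set (List Char) :=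
  spread_input.foldl pvGspStep PySem.Set.empty

def parse_input (my_input : List Char) : List Char × PySem.Set (List Char) :=
  let input_array := PySem.Chars.splitOn (PySem.Chars.strip my_input) ['\n']
  let line0 := input_array.headI
  let start_idx := min (PySem.Chars.find line0 ['.']) (PySem.Chars.find line0 ['#'])
  let init_state := PySem.List.slice line0 (some start_idx) none
  (init_state, get_spread_pattern input_array)

def calc_next_gen (curr_pop : List Char) (spread_pattern : PySem.Set (List Char)) (curr_offset : Int) :
    List Char × Int :=
  let start_idx := PySem.Chars.find curr_pop ['#']
  let pop1 : List Char :=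
    if start_idx < 5 then PySem.List.pyRepeat ['.'] (5 - start_idx) ++ curr_pop
    else if start_idx > 5 then PySem.List.slice curr_pop (some (start_idx - 5)) none
    else curr_pop
  let off1 : Int :=
    if start_idx < 5 then curr_offset + (5 - start_idx)
    else if start_idx > 5 then curr_offset - (start_idx - 5)
    else curr_offset
  let end_idx := PySem.Chars.rfind pop1 ['#']
  let num_dots : Int := (pop1.length : Int) - end_idx - 1
  let pop2 : List Char :=
    if num_dots < 5 then pop1 ++ PySem.List.pyRepeat ['.'] (5 - num_dots)
    else if num_dots > 5 then PySem.List.slice pop1 none (some (-(num_dots - 5)))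
    else pop1
  let next_pop := (PySem.List.pyRange 0 ((pop2.length : Int) - 3) 1).foldl
    (fun acc idx =>
      if PySem.Set.contains spread_pattern (PySem.List.slice pop2 (some (idx - 2)) (some (idx + 3)))
      then acc ++ ['#'] else acc ++ ['.'])
    []
  (next_pop, off1)

def calc_sum (state : List Char) (offset : Int) : Int :=
  (PySem.List.enumerate state 0).foldl
    (fun acc ic => if ic.2 = '#' then acc + (ic.1 - offset) else acc) 0

def pvRunA (patt : PySem.Set (List Char)) (fuel : Nat) (i : Nat) (pop : List Char) (off : Int)
    (generations : Int) (sums : List Int) (diff : Int) : Int × List Int × Int :=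
  match fuel with
  | 0 => (generations, sums, diff)
  | fuel' + 1 =>
    let st := calc_next_gen pop patt off
    let generations' := generations + 1
    let sums' := sums ++ [calc_sum st.1 st.2]
    if 100 ≤ i then
      let diff' := PySem.List.pyGetD sums' (i : Int) 0 - PySem.List.pyGetD sums' ((i : Int) - 1) 0
      let found := (PySem.List.pyRange 0 100 1).all (fun j =>
        PySem.List.pyGetD sums' ((i : Int) - j) 0 - PySem.List.pyGetD sums' ((i : Int) - j - 1) 0 == diff')
      if found then (generations', sums', diff')
      else pvRunA patt fuel' (i + 1) st.1 st.2 generations' sums' diff'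
    else pvRunA patt fuel' (i + 1) st.1 st.2 generations' sums' diff

def calc_sum_after_x_generations (my_input : String) (num_generations : Int) : Int :=
  let ps := parse_input my_input.toList
  let res := pvRunA ps.2 num_generations.toNat 0 ps.1 0 0 [] 0
  if res.1 = num_generations then PySem.List.pyGetD res.2.1 (res.1 - 1) 0
  else PySem.List.pyGetD res.2.1 (res.1 - 1) 0 + (num_generations - res.1) * res.2.2

-- ===== PORT B =====
def pvPatOk (line : List Char) : Bool :=
  match line with
  | [] => false
  | c :: _ => (c == '.' || c == '#') && (PySem.List.pyGetD line (-1) ' ' == '#')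

def pvWindow (cells : PySem.Dict Int Char) (p : Int) : List Char :=
  (PySem.List.pyRange (p - 2) (p + 3) 1).map (fun q => cells.getD q '.')

def pvStepB (cells : PySem.Dict Int Char) (patterns : PySem.Set (List Char)) : PySem.Dict Int Char :=
  let live := (cells.items.filter (fun pc => pc.2 == '#')).map (·.1)
  if live.isEmpty then PySem.Dict.empty
  else
    let lo := (PySem.List.min? live (fun x => x)).getD 0
    let hi := (PySem.List.max? live (fun x => x)).getD 0
    (PySem.List.pyRange (lo - 3) (hi + 3) 1).foldl
      (fun d p => if PySem.Set.contains patterns (pvWindow cells p) then d.insert p '#' else d)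
      PySem.Dict.empty

def pvSumB (cells : PySem.Dict Int Char) : Int := (cells.items.map (·.1)).sum

def pvRunB (patterns : PySem.Set (List Char)) (fuel : Nat) (i : Nat) (cells : PySem.Dict Int Char)
    (rsums : List Int) (diff : Int) : List Int × Int :=
  match fuel with
  | 0 => (rsums, diff)
  | fuel' + 1 =>
    let cells' := pvStepB cells patterns
    let rsums' := pvSumB cells' :: rsums
    if 100 ≤ i then
      let ds := List.zipWith (fun x y => x - y) (rsums'.take 101) (rsums'.drop 1)
      let diff' := ds.headI
      if (ds.take 100).all (fun d => d == diff') then (rsums', diff')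
      else pvRunB patterns fuel' (i + 1) cells' rsums' diff'
    else pvRunB patterns fuel' (i + 1) cells' rsums' diff

def calc_sum_after_x_generations_alt (my_input : String) (num_generations : Int) : Int :=
  let lines := PySem.Chars.splitOn (PySem.Chars.strip my_input.toList) ['\n']
  let first := lines.headI
  let start := min (PySem.Chars.find first ['.']) (PySem.Chars.find first ['#'])
  let init_state := PySem.List.slice first (some start) none
  let patterns := PySem.Set.ofList
    ((lines.filter pvPatOk).map (fun l => PySem.List.slice l (some 0) (some 5)))
  let cells := (PySem.List.enumerate init_state 0).foldl
    (fun d ic => if ic.2 ≠ '.' then d.insert ic.1 ic.2 else d) PySem.Dict.empty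
  let res := pvRunB patterns num_generations.toNat 0 cells [] 0
  if (res.1.length : Int) = num_generations then res.1.headI
  else res.1.headI + (num_generations - res.1.length) * res.2

-- ===== PRECONDITION & SPEC =====
-- Pre_ excludes exactly num_generations ≤ 0, where A raises IndexError (sums[-1] on an empty list).
def Pre_calc_sum_after_x_generations (my_input : String) (num_generations : Int) : Prop :=
  1 ≤ num_generations
instance (my_input : String) (num_generations : Int) :
    Decidable (Pre_calc_sum_after_x_generations my_input num_generations) := by
  unfold Pre_calc_sum_after_x_generations; infer_instance

def pvWitness_calc_sum_after_x_generations : String × Int :=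
  ("initial state: #..#.#\n\n..#.. => #\n.#... => #\n##... => #", 3)

def Spec_calc_sum_after_x_generations (my_input : String) (num_generations : Int) (out : Int) : Prop :=
  out = calc_sum_after_x_generations_alt my_input num_generations
instance (my_input : String) (num_generations : Int) (out : Int) :
    Decidable (Spec_calc_sum_after_x_generations my_input num_generations out) := by
  unfold Spec_calc_sum_after_x_generations; infer_instance

-- ===== CLAIM (what is proved, stated in full; the proofs are below) =====
def Claim_equal_calc_sum_after_x_generations : Prop :=
  ∀ (my_input : String) (num_generations : Int),
    Dom_calc_sum_after_x_generations my_input num_generations →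
    Pre_calc_sum_after_x_generations my_input num_generations →
    Spec_calc_sum_after_x_generations my_input num_generations
      (calc_sum_after_x_generations my_input num_generations)

-- ===== LEMMAS AND PROOFS =====

-- The value of the infinite tape encoded by string `s` with offset `o` at absolute position `p`.
def pvRep (s : List Char) (o : Int) (p : Int) : Char :=
  if 0 ≤ p + o then (s[(p + o).toNat]?).getD '.' else '.'

-- B's dict has distinct keys and agrees with the tape A's string encodes.
def pvInv (s : List Char) (o : Int) (cells : PySem.Dict Int Char) : Prop :=
  (cells.items.map Prod.fst).Nodup ∧ ∀ p : Int, cells.getD p '.' = pvRep s o p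

-- A's pattern-fold step, phrased through B's line predicate
lemma pvGspStep_eq (sp : PySem.Set (List Char)) (line : List Char) :
    pvGspStep sp line =
      if pvPatOk line then PySem.Set.add sp (PySem.List.slice line (some 0) (some 5)) else sp := by
  cases line with
  | nil => rfl
  | cons c t =>
    by_cases h2 : PySem.List.pyGetD (c :: t) (-1) ' ' = '#' <;>
      by_cases hc1 : c = '.' <;> by_cases hc2 : c = '#' <;>
        simp [pvGspStep, pvPatOk, hc1, hc2, h2]

-- A's fold over the lines builds B's pattern set
lemma pv_fold_patterns : ∀ (lines : List (List Char)) (sp : PySem.Set (List Char)),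
    lines.foldl pvGspStep sp =
      ((lines.filter pvPatOk).map (fun l => PySem.List.slice l (some 0) (some 5))).foldl
        PySem.Set.add sp := by
  intro lines
  induction lines with
  | nil => intro sp; rfl
  | cons hd tl ih =>
    intro sp
    rw [List.foldl_cons, pvGspStep_eq, List.filter_cons]
    by_cases h : pvPatOk hd
    · rw [if_pos h, if_pos h, List.map_cons, List.foldl_cons, ih]
    · rw [if_neg h, if_neg h, ih]

lemma pv_patterns_no_empty (lines : List (List Char)) (sp : PySem.Set (List Char))
    (h : [] ∉ sp) : [] ∉ lines.foldl pvGspStep sp := by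
  induction lines generalizing sp with
  | nil => exact h
  | cons line rest ih =>
    refine ih _ ?_
    cases line with
    | nil => simpa [pvGspStep] using h
    | cons c t =>
      simp only [pvGspStep]
      split_ifs with h1 h2
      · intro hmem
        rcases (PySem.Set.mem_add _ _ _).1 hmem with h' | h'
        · exact h h'
        · have hcl : PySem.List.clampIdx (c :: t).length 0 = 0 := by
            simp [PySem.List.clampIdx]
          have : PySem.List.slice (c :: t) (some 0) (some 5) ≠ [] := by
            simp only [PySem.List.slice, hcl]
            simp [PySem.List.clampIdx, List.take_eq_nil_iff]
          exact this h'.symm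
      · exact h
      · exact h

-- prefix / infix facts about a single character
lemma pv_singleton_prefix (c : Char) (l : List Char) : [c] <+: l ↔ l.head? = some c := by
  cases l with
  | nil => simp
  | cons a t =>
    rw [List.cons_prefix_cons]
    simp [eq_comm]

lemma pv_prefix_drop (c : Char) (s : List Char) (i : Nat) :
    [c] <+: s.drop i ↔ s[i]? = some c := by
  rw [pv_singleton_prefix, List.head?_drop]

lemma pv_singleton_infix (c : Char) (s : List Char) : [c] <:+: s ↔ c ∈ s := by
  constructor
  · rintro ⟨l, r, rfl⟩; simp
  · intro hm
    rcases List.getElem_of_mem hm with ⟨i, hi, rfl⟩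
    exact ⟨s.take i, s.drop (i + 1), by simp⟩

lemma pv_find_char_neg (s : List Char) (c : Char) (h : c ∉ s) :
    PySem.Chars.find s [c] = -1 := by
  rw [PySem.Chars.find_eq_neg_one_iff, pv_singleton_infix]; exact h

lemma pv_find_char_spec (s : List Char) (c : Char) (h : c ∈ s) :
    0 ≤ PySem.Chars.find s [c] ∧ PySem.Chars.find s [c] < (s.length : Int) ∧
    s[(PySem.Chars.find s [c]).toNat]? = some c ∧
    ∀ j : Nat, (j : Int) < PySem.Chars.find s [c] → s[j]? ≠ some c := by
  have h0 : 0 ≤ PySem.Chars.find s [c] := by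
    rw [PySem.Chars.find_nonneg_iff, pv_singleton_infix]; exact h
  obtain ⟨hpre, hmin⟩ := PySem.Chars.find_spec h0
  have hget : s[(PySem.Chars.find s [c]).toNat]? = some c := (pv_prefix_drop _ _ _).1 hpre
  refine ⟨h0, ?_, hget, ?_⟩
  · have := (List.getElem?_eq_some_iff.1 hget).1
    omega
  · intro j hj hc
    exact hmin j (by omega) ((pv_prefix_drop _ _ _).2 hc)

lemma pv_rfind_go_zero (s sub : List Char) :
    PySem.Chars.rfind.go s sub 0 = if sub.isPrefixOf s then (0 : Int) else -1 := rfl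

lemma pv_rfind_go_succ (s sub : List Char) (k : Nat) :
    PySem.Chars.rfind.go s sub (k + 1) =
      if sub.isPrefixOf (s.drop (k + 1)) then ((k + 1 : Nat) : Int)
      else PySem.Chars.rfind.go s sub k := rfl

lemma pv_rfind_go_spec (s : List Char) (c : Char) : ∀ k : Nat,
    (PySem.Chars.rfind.go s [c] k = -1 ∧ ∀ j : Nat, j ≤ k → s[j]? ≠ some c) ∨
    (∃ e : Nat, PySem.Chars.rfind.go s [c] k = e ∧ e ≤ k ∧ s[e]? = some c ∧
      ∀ j : Nat, e < j → j ≤ k → s[j]? ≠ some c) := by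
  intro k
  induction k with
  | zero =>
    rw [pv_rfind_go_zero]
    by_cases hp : [c] <+: s
    · right
      refine ⟨0, ?_, le_refl _, ?_, by omega⟩
      · simp [List.isPrefixOf_iff_prefix.2 hp]
      · have := (pv_prefix_drop c s 0).1 (by simpa using hp)
        simpa using this
    · left
      refine ⟨by rw [if_neg (by simp [List.isPrefixOf_iff_prefix]; exact hp)], ?_⟩
      intro j hj
      interval_cases j
      intro hc
      exact hp ((pv_prefix_drop c s 0).2 (by simpa using hc))
  | succ k ih =>
    rw [pv_rfind_go_succ]
    by_cases hp : [c] <+: s.drop (k + 1)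
    · right
      refine ⟨k + 1, by simp [List.isPrefixOf_iff_prefix.2 hp], le_refl _,
        (pv_prefix_drop _ _ _).1 hp, by omega⟩
    · have hnot : s[k + 1]? ≠ some c := fun hc => hp ((pv_prefix_drop _ _ _).2 hc)
      have hif : (if ([c]).isPrefixOf (s.drop (k + 1)) then ((k + 1 : Nat) : Int)
          else PySem.Chars.rfind.go s [c] k) = PySem.Chars.rfind.go s [c] k := by
        rw [if_neg (by simp [List.isPrefixOf_iff_prefix]; exact hp)]
      rw [hif]
      rcases ih with ⟨he, hall⟩ | ⟨e, he, hle, hget, hall⟩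
      · left
        refine ⟨he, fun j hj => ?_⟩
        rcases Nat.lt_or_ge j (k + 1) with h' | h'
        · exact hall j (by omega)
        · have : j = k + 1 := by omega
          simpa [this] using hnot
      · right
        refine ⟨e, he, by omega, hget, fun j hj1 hj2 => ?_⟩
        rcases Nat.lt_or_ge j (k + 1) with h' | h'
        · exact hall j hj1 (by omega)
        · have : j = k + 1 := by omega
          simpa [this] using hnot

lemma pv_rfind_char_neg (s : List Char) (c : Char) (h : c ∉ s) :
    PySem.Chars.rfind s [c] = -1 := by
  rcases pv_rfind_go_spec s c s.length with ⟨he, _⟩ | ⟨e, he, _, hget, _⟩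
  · exact he
  · exact absurd (List.mem_of_getElem? hget) h

lemma pv_rfind_char_spec (s : List Char) (c : Char) (h : c ∈ s) :
    ∃ e : Nat, PySem.Chars.rfind s [c] = e ∧ e < s.length ∧ s[e]? = some c ∧
      ∀ j : Nat, e < j → s[j]? ≠ some c := by
  rcases pv_rfind_go_spec s c s.length with ⟨_, hall⟩ | ⟨e, he, _, hget, hall⟩
  · exfalso
    rcases List.getElem_of_mem h with ⟨i, hi, rfl⟩
    exact hall i (by omega) (by simp [hi])
  · have helt : e < s.length := List.getElem?_eq_some_iff.1 hget |>.1
    refine ⟨e, he, helt, hget, fun j hj => ?_⟩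
    rcases Nat.lt_or_ge j (s.length + 1) with h' | h'
    · exact hall j hj (by omega)
    · simp [List.getElem?_eq_none (by omega : s.length ≤ j)]

-- dict-building loops: inserting along a list of distinct keys appends in order
lemma pv_contains_mk_false (l : List (Int × Char)) (k : Int) (h : k ∉ l.map Prod.fst) :
    PySem.Dict.contains (⟨l⟩ : PySem.Dict Int Char) k = false := by
  simp only [PySem.Dict.contains, List.any_eq_false]
  intro p hp
  simp only [beq_iff_eq]
  intro he
  exact h (he ▸ List.mem_map_of_mem hp)

lemma pv_foldl_insert_items (cond : Int × Char → Prop) [DecidablePred cond] :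
    ∀ (l acc : List (Int × Char)), (l.map Prod.fst).Nodup →
      (∀ k, k ∈ l.map Prod.fst → k ∉ acc.map Prod.fst) →
      (l.foldl (fun d ic => if cond ic then d.insert ic.1 ic.2 else d)
        (⟨acc⟩ : PySem.Dict Int Char)).items
        = acc ++ l.filter (fun ic => decide (cond ic)) := by
  intro l
  induction l with
  | nil => intro acc _ _; simp
  | cons hd tl ih =>
    intro acc hnd hacc
    simp only [List.foldl_cons]
    by_cases hc : cond hd
    · have hfresh : hd.1 ∉ acc.map Prod.fst := hacc hd.1 (by simp)
      have hins : (⟨acc⟩ : PySem.Dict Int Char).insert hd.1 hd.2 = ⟨acc ++ [(hd.1, hd.2)]⟩ := by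
        simp [PySem.Dict.insert, pv_contains_mk_false acc hd.1 hfresh]
      rw [if_pos hc, hins, ih (acc ++ [(hd.1, hd.2)]) (by simpa using hnd.of_cons) ?_]
      · simp [hc]
      · intro k hk
        simp only [List.map_append, List.mem_append] at *
        rintro (h' | h')
        · exact hacc k (by simp [hk]) h'
        · simp only [List.map_cons, List.map_nil, List.mem_singleton] at h'
          subst h'
          simp only [List.map_cons, List.nodup_cons] at hnd
          exact hnd.1 hk
    · rw [if_neg hc, ih acc (by simpa using hnd.of_cons) (fun k hk => hacc k (by simp [hk]))]
      simp [hc]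

lemma pv_get?_mk (l : List (Int × Char)) (k : Int) :
    PySem.Dict.get? (⟨l⟩ : PySem.Dict Int Char) k
      = (l.find? (fun p => p.1 == k)).map Prod.snd := rfl

lemma pv_find?_key_some : ∀ {l : List (Int × Char)}, (l.map Prod.fst).Nodup →
    ∀ {p : Int} {v : Char}, (p, v) ∈ l → l.find? (fun ic => ic.1 == p) = some (p, v) := by
  intro l
  induction l with
  | nil => intro _ p v hm; simp at hm
  | cons hd tl ih =>
    intro hnd p v hm
    rcases List.mem_cons.1 hm with rfl | hm'
    · simp
    · have hne : ¬ (hd.1 == p) := by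
        simp only [beq_iff_eq]
        intro he
        simp only [List.map_cons, List.nodup_cons] at hnd
        exact hnd.1 (he ▸ List.mem_map_of_mem hm')
      rw [List.find?_cons_of_neg (by simpa using hne)]
      exact ih (by simpa using hnd.of_cons) hm'

lemma pv_getD_mk_of_mem {l : List (Int × Char)} (hnd : (l.map Prod.fst).Nodup)
    {p : Int} {v : Char} (hm : (p, v) ∈ l) (d : Char) :
    PySem.Dict.getD (⟨l⟩ : PySem.Dict Int Char) p d = v := by
  simp [PySem.Dict.getD, pv_get?_mk, pv_find?_key_some hnd hm]

lemma pv_getD_mk_of_not_mem {l : List (Int × Char)} {p : Int}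
    (h : p ∉ l.map Prod.fst) (d : Char) :
    PySem.Dict.getD (⟨l⟩ : PySem.Dict Int Char) p d = d := by
  have : l.find? (fun ic => ic.1 == p) = none := by
    rw [List.find?_eq_none]
    intro x hx
    simp only [beq_iff_eq]
    intro he
    exact h (he ▸ List.mem_map_of_mem hx)
  simp [PySem.Dict.getD, pv_get?_mk, this]

-- initial dict satisfies the invariant
lemma pv_init_inv (init : List Char) :
    pvInv init 0 ((PySem.List.enumerate init 0).foldl
      (fun d ic => if ic.2 ≠ '.' then d.insert ic.1 ic.2 else d) PySem.Dict.empty) := by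
  have hnd : ((PySem.List.enumerate init 0).map Prod.fst).Nodup := by
    rw [List.nodup_iff_pairwise_ne, List.pairwise_map]
    exact (PySem.List.pairwise_lt_enumerate init 0).imp (fun h => ne_of_lt h)
  have hitems := pv_foldl_insert_items (fun ic => ic.2 ≠ '.')
    (PySem.List.enumerate init 0) [] hnd (by simp)
  have hset : ((PySem.List.enumerate init 0).foldl
      (fun d ic => if ic.2 ≠ '.' then d.insert ic.1 ic.2 else d) PySem.Dict.empty)
      = (⟨(PySem.List.enumerate init 0).filter (fun ic => decide (ic.2 ≠ '.'))⟩ :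
          PySem.Dict Int Char) := by
    apply PySem.Dict.ext
    simpa using hitems
  rw [hset]
  refine ⟨?_, ?_⟩
  · exact hnd.sublist (List.filter_sublist.map Prod.fst)
  have hndf : (((PySem.List.enumerate init 0).filter
      (fun ic => decide (ic.2 ≠ '.'))).map Prod.fst).Nodup :=
    hnd.sublist (List.filter_sublist.map Prod.fst)
  have hkey : ∀ k : Int, k ∈ ((PySem.List.enumerate init 0).filter
      (fun ic => decide (ic.2 ≠ '.'))).map Prod.fst →
      ∃ (j : Nat) (hj : j < init.length), k = (j : Int) ∧ init[j] ≠ '.' := by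
    intro k hk
    rcases List.mem_map.1 hk with ⟨ic, hic, rfl⟩
    have hmem := List.mem_filter.1 hic
    rcases (PySem.List.mem_enumerate_iff _ _ _).1 hmem.1 with ⟨j, hj, rfl⟩
    refine ⟨j, hj, by simp, ?_⟩
    have := hmem.2
    simpa using this
  intro p
  unfold pvRep
  simp only [add_zero]
  by_cases h0 : 0 ≤ p
  · by_cases hlt : p.toNat < init.length
    · by_cases hdot : init[p.toNat] = '.'
      · rw [pv_getD_mk_of_not_mem, if_pos h0, List.getElem?_eq_getElem hlt]
        simp only [Option.getD_some, hdot]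
        intro hk
        rcases hkey p hk with ⟨j, hj, hpj, hne⟩
        have hjp : j = p.toNat := by omega
        subst hjp
        exact hne hdot
      · have hmem : ((p : Int), init[p.toNat]) ∈ (PySem.List.enumerate init 0).filter
            (fun ic => decide (ic.2 ≠ '.')) := by
          rw [List.mem_filter]
          refine ⟨(PySem.List.mem_enumerate_iff _ _ _).2 ⟨p.toNat, hlt, by simp; omega⟩, by simpa using hdot⟩
        rw [pv_getD_mk_of_mem hndf hmem, if_pos h0, List.getElem?_eq_getElem hlt]
        rfl
    · rw [pv_getD_mk_of_not_mem, if_pos h0, List.getElem?_eq_none (by omega : init.length ≤ p.toNat)]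
      simp only [Option.getD_none]
      intro hk
      rcases hkey p hk with ⟨j, hj, hpj, _⟩
      omega
  · rw [pv_getD_mk_of_not_mem, if_neg h0]
    intro hk
    rcases hkey p hk with ⟨j, _, hpj, _⟩
    omega

-- how pvRep transports along A's padding / trimming operations
lemma pvRep_pad_left (s : List Char) (o : Int) (k : Nat) (p : Int) :
    pvRep (List.replicate k '.' ++ s) (o + k) p = pvRep s o p := by
  unfold pvRep
  by_cases h1 : 0 ≤ p + o
  · rw [if_pos (by omega), if_pos h1,
      List.getElem?_append_right (by simp; omega)]
    have hidx : (p + (o + (k : Int))).toNat - (List.replicate k '.').length = (p + o).toNat := by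
      simp; omega
    rw [hidx]
  · rw [if_neg h1]
    by_cases h2 : 0 ≤ p + (o + k)
    · rw [if_pos h2, List.getElem?_append_left (by simp; omega), List.getElem?_replicate_of_lt (by omega)]
      rfl
    · rw [if_neg h2]

lemma pvRep_drop_left (s : List Char) (o : Int) (t : Nat) (p : Int) :
    pvRep (s.drop t) (o - t) p = if (t : Int) ≤ p + o then pvRep s o p else '.' := by
  unfold pvRep
  by_cases h1 : (t : Int) ≤ p + o
  · rw [if_pos h1, if_pos (by omega), if_pos (by omega), List.getElem?_drop]
    congr 2
    omega
  · rw [if_neg h1, if_neg (by omega : ¬ (0 ≤ p + (o - (t : Int))))]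

lemma pvRep_pad_right (s : List Char) (o : Int) (k : Nat) (p : Int) :
    pvRep (s ++ List.replicate k '.') o p = pvRep s o p := by
  unfold pvRep
  by_cases h1 : 0 ≤ p + o
  · rw [if_pos h1, if_pos h1]
    by_cases h2 : (p + o).toNat < s.length
    · rw [List.getElem?_append_left h2]
    · rw [List.getElem?_eq_none (by omega : s.length ≤ (p + o).toNat)]
      by_cases h3 : (p + o).toNat < s.length + k
      · rw [List.getElem?_append_right (by omega), List.getElem?_replicate_of_lt (by omega)]
        rfl
      · rw [List.getElem?_eq_none (by simp; omega)]
  · rw [if_neg h1, if_neg h1]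

lemma pvRep_take_right (s : List Char) (o : Int) (t : Nat) (p : Int) :
    pvRep (s.take t) o p = if p + o < (t : Int) then pvRep s o p else '.' := by
  unfold pvRep
  by_cases h1 : 0 ≤ p + o
  · by_cases h2 : p + o < (t : Int)
    · rw [if_pos h2, if_pos h1, if_pos h1, List.getElem?_take_of_lt (by omega)]
    · rw [if_neg h2, if_pos h1, List.getElem?_eq_none (by simp; omega)]
      rfl
  · rw [if_neg h1, if_neg h1]
    split <;> rfl

lemma pvRep_out_of_range (s : List Char) (o : Int) (p : Int)
    (h : p + o < 0 ∨ (s.length : Int) ≤ p + o) : pvRep s o p = '.' := by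
  unfold pvRep
  rcases h with h | h
  · rw [if_neg (by omega)]
  · rw [if_pos (by omega), List.getElem?_eq_none (by omega : s.length ≤ (p + o).toNat)]
    rfl

lemma pvRep_mem_of_hash (s : List Char) (o : Int) (p : Int) (h : pvRep s o p = '#') :
    '#' ∈ s := by
  unfold pvRep at h
  split at h
  · rcases h' : s[(p + o).toNat]? with _ | c
    · rw [h'] at h; exact absurd h (by decide)
    · rw [h'] at h; simp at h; exact h ▸ List.mem_of_getElem? h'
  · exact absurd h (by decide)

-- a slice that lies fully inside the list is the five-element window
lemma pv_slice5 (l : List Char) (a : Int) (h0 : 0 ≤ a) (h5 : a + 5 ≤ (l.length : Int)) :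
    PySem.List.slice l (some a) (some (a + 5)) =
      [(l[a.toNat]?).getD '.', (l[(a + 1).toNat]?).getD '.', (l[(a + 2).toNat]?).getD '.',
        (l[(a + 3).toNat]?).getD '.', (l[(a + 4).toNat]?).getD '.'] := by
  rw [PySem.List.slice_toNat l h0 (by omega)]
  have hlen : ∀ i : Nat, i < 5 → a.toNat + i < l.length := by intro i hi; omega
  have hget : ∀ i : Nat, i < 5 → ((a + i : Int)).toNat = a.toNat + i := by intro i hi; omega
  have h55 : (a + 5).toNat - a.toNat = 5 := by omega
  rw [h55]
  have key : ∀ (j : Nat), j < 5 → l[a.toNat + j]? = some ((l[(a + (j : Int)).toNat]?).getD '.') := by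
    intro j hj
    have hja : (a + (j : Int)).toNat = a.toNat + j := by omega
    rw [hja, List.getElem?_eq_getElem (by omega)]
    rfl
  apply List.ext_getElem?
  intro i
  by_cases hi : i < 5
  · rw [List.getElem?_take_of_lt hi, List.getElem?_drop, key i hi]
    interval_cases i <;> norm_num
  · rw [List.getElem?_eq_none (by simp only [List.length_take, List.length_drop]; omega),
      List.getElem?_eq_none (by simp only [List.length_cons, List.length_nil]; omega)]

-- the two degenerate windows at the left edge are empty
lemma pv_slice_neg_empty (l : List Char) (k b : Nat) (hk : 0 < k) (h : b + k ≤ l.length) :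
    PySem.List.slice l (some (-(k : Int))) (some (b : Int)) = [] := by
  have h1 : PySem.List.clampIdx l.length (-(k : Int)) = l.length - k := by
    rw [PySem.List.clampIdx, if_pos (by omega), if_neg (by omega)]
    omega
  have h2 : PySem.List.clampIdx l.length (b : Int) = b := by
    rw [PySem.List.clampIdx, if_neg (by omega)]
    simp
    omega
  simp only [PySem.List.slice, h1, h2, List.take_eq_nil_iff]
  left
  omega

-- range shifting
lemma pv_pyRange_shift (a b t : Int) :
    (PySem.List.pyRange a b 1).map (· + t) = PySem.List.pyRange (a + t) (b + t) 1 := by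
  rw [PySem.List.pyRange_one, PySem.List.pyRange_one, List.map_map]
  have : b + t - (a + t) = b - a := by ring
  rw [this]
  congr 1
  funext k
  simp
  ring

-- pvRep of a mapped range
lemma pv_rep_map_pyRange (g : Int → Char) (N : Int) (o p : Int) :
    pvRep ((PySem.List.pyRange 0 N 1).map g) o p
      = if 0 ≤ p + o ∧ p + o < N then g (p + o) else '.' := by
  unfold pvRep
  have hlen : ((PySem.List.pyRange 0 N 1).map g).length = N.toNat := by
    simp [PySem.List.length_pyRange_one]
  by_cases h1 : 0 ≤ p + o ∧ p + o < N
  · rw [if_pos h1.1, if_pos h1]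
    have hidx : (p + o).toNat < N.toNat := by omega
    rw [List.getElem?_eq_getElem (by rw [hlen]; exact hidx)]
    simp only [Option.getD_some]
    rw [List.getElem_map, PySem.List.getElem_pyRange_one]
    congr 1
    omega
  · rw [if_neg h1]
    by_cases h2 : 0 ≤ p + o
    · rw [if_pos h2, List.getElem?_eq_none (by rw [hlen]; omega)]
      rfl
    · rw [if_neg h2]

-- calc_sum as a filtered sum
lemma pv_calc_sum_eq (state : List Char) (off : Int) :
    calc_sum state off
      = (((PySem.List.enumerate state 0).filter (fun ic => ic.2 == '#')).map
          (fun ic => ic.1 - off)).sum := by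
  unfold calc_sum
  have hbody : (fun (acc : Int) (ic : Int × Char) => if ic.2 = '#' then acc + (ic.1 - off) else acc)
      = (fun acc ic => if (ic.2 == '#') = true then acc + (ic.1 - off) else acc) := by
    funext acc ic
    by_cases h : ic.2 = '#' <;> simp [h]
  rw [hbody, PySem.List.foldl_if_eq_foldl_filter, PySem.List.foldl_add]
  simp

-- a set with no empty member does not contain []
lemma pv_contains_nil_false (patt : PySem.Set (List Char)) (hp : [] ∉ patt) :
    PySem.Set.contains patt ([] : List Char) = false := by
  rw [PySem.Set.contains]
  simpa using hp

lemma pv_rep_replicate (n : Nat) (o p : Int) : pvRep (List.replicate n '.') o p = '.' := by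
  unfold pvRep
  split
  · by_cases h2 : (p + o).toNat < n
    · rw [List.getElem?_replicate_of_lt h2]
      rfl
    · rw [List.getElem?_eq_none (by simpa using h2)]
      rfl
  · rfl

-- B's window, written out as the five dict lookups
lemma pvWindow_eq (cells : PySem.Dict Int Char) (p : Int) :
    pvWindow cells p
      = [cells.getD (p - 2) '.', cells.getD (p - 1) '.', cells.getD p '.',
          cells.getD (p + 1) '.', cells.getD (p + 2) '.'] := by
  unfold pvWindow
  have h : PySem.List.pyRange (p - 2) (p + 3) 1 = [p - 2, p - 1, p, p + 1, p + 2] := by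
    rw [PySem.List.pyRange_one_cons (by omega), PySem.List.pyRange_one_cons (by omega),
        PySem.List.pyRange_one_cons (by omega), PySem.List.pyRange_one_cons (by omega),
        PySem.List.pyRange_one_cons (by omega), PySem.List.pyRange_one]
    norm_num
    omega
  rw [h]
  rfl

-- front normalization of calc_next_gen
lemma pv_front (s : List Char) (o f : Int) (hf : f = PySem.Chars.find s ['#']) (hs : '#' ∈ s) :
    (((if f < 5 then PySem.List.pyRepeat ['.'] (5 - f) ++ s
      else if f > 5 then PySem.List.slice s (some (f - 5)) none else s).length : Int)
        = (s.length : Int) + 5 - f)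
    ∧ (if f < 5 then o + (5 - f) else if f > 5 then o - (f - 5) else o) = o + 5 - f
    ∧ (∀ q : Int,
        (f - 5 ≤ q + o →
          pvRep (if f < 5 then PySem.List.pyRepeat ['.'] (5 - f) ++ s
            else if f > 5 then PySem.List.slice s (some (f - 5)) none else s)
            (if f < 5 then o + (5 - f) else if f > 5 then o - (f - 5) else o) q = pvRep s o q)
        ∧ (q + o < f - 5 →
          pvRep (if f < 5 then PySem.List.pyRepeat ['.'] (5 - f) ++ s
            else if f > 5 then PySem.List.slice s (some (f - 5)) none else s)
            (if f < 5 then o + (5 - f) else if f > 5 then o - (f - 5) else o) q = '.')) := by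
  obtain ⟨hf0, hflen, hfget, hfmin⟩ := pv_find_char_spec s '#' hs
  rw [← hf] at hf0 hflen hfget hfmin
  rcases lt_trichotomy f 5 with h | h | h
  · rw [if_pos h, if_pos h, PySem.List.pyRepeat_singleton]
    have hk : o + (5 - f) = o + ((5 - f).toNat : Int) := by omega
    refine ⟨by simp; omega, by omega, fun q => ⟨fun _ => ?_, fun hq => ?_⟩⟩
    · rw [hk, pvRep_pad_left]
    · rw [hk, pvRep_pad_left, pvRep_out_of_range]
      left; omega
  · rw [if_neg (by omega), if_neg (by omega), if_neg (by omega), if_neg (by omega)]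
    refine ⟨by omega, by omega, fun q => ⟨fun _ => rfl, fun hq => ?_⟩⟩
    rw [pvRep_out_of_range]
    left; omega
  · rw [if_neg (by omega), if_pos h, if_neg (by omega), if_pos h,
      PySem.List.slice_from _ (by omega : (0:Int) ≤ f - 5)]
    have hk : o - (f - 5) = o - ((f - 5).toNat : Int) := by omega
    refine ⟨by simp; omega, by omega, fun q => ⟨fun hq => ?_, fun hq => ?_⟩⟩
    · rw [hk, pvRep_drop_left, if_pos (by omega)]
    · rw [hk, pvRep_drop_left, if_neg (by omega)]

-- back normalization of calc_next_gen (t = already front-normalized population)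
lemma pv_back (t : List Char) (w e : Int) (he : e = PySem.Chars.rfind t ['#']) (ht : '#' ∈ t) :
    (((if ((t.length : Int) - e - 1) < 5
        then t ++ PySem.List.pyRepeat ['.'] (5 - ((t.length : Int) - e - 1))
        else if ((t.length : Int) - e - 1) > 5
          then PySem.List.slice t none (some (-(((t.length : Int) - e - 1) - 5)))
          else t).length : Int) = e + 6)
    ∧ (∀ q : Int,
        (q + w ≤ e + 5 →
          pvRep (if ((t.length : Int) - e - 1) < 5
            then t ++ PySem.List.pyRepeat ['.'] (5 - ((t.length : Int) - e - 1))
            else if ((t.length : Int) - e - 1) > 5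
              then PySem.List.slice t none (some (-(((t.length : Int) - e - 1) - 5)))
              else t) w q = pvRep t w q)
        ∧ (e + 5 < q + w →
          pvRep (if ((t.length : Int) - e - 1) < 5
            then t ++ PySem.List.pyRepeat ['.'] (5 - ((t.length : Int) - e - 1))
            else if ((t.length : Int) - e - 1) > 5
              then PySem.List.slice t none (some (-(((t.length : Int) - e - 1) - 5)))
              else t) w q = '.')) := by
  obtain ⟨eN, heN, helt, hget, hmax⟩ := pv_rfind_char_spec t '#' ht
  rw [← he] at heN
  have he0 : 0 ≤ e := by omega
  have helt' : e < (t.length : Int) := by omega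
  rcases lt_trichotomy ((t.length : Int) - e - 1) 5 with h | h | h
  · rw [if_pos h, PySem.List.pyRepeat_singleton]
    refine ⟨by simp; omega, fun q => ⟨fun _ => pvRep_pad_right _ _ _ _, fun hq => ?_⟩⟩
    rw [pvRep_pad_right]
    exact pvRep_out_of_range _ _ _ (Or.inr (by omega))
  · rw [if_neg (by omega), if_neg (by omega)]
    refine ⟨by omega, fun q => ⟨fun _ => rfl, fun hq => ?_⟩⟩
    exact pvRep_out_of_range _ _ _ (Or.inr (by omega))
  · have hkey : -(((t.length : Int) - e - 1) - 5) = -((((t.length : Int) - e - 6).toNat : Int)) := by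
      omega
    rw [if_neg (by omega), if_pos h, hkey,
      PySem.List.slice_to_neg_natCast t ((t.length : Int) - e - 6).toNat (by omega)]
    have hlen2 : t.length - ((t.length : Int) - e - 6).toNat = (e + 6).toNat := by omega
    rw [hlen2]
    refine ⟨by simp; omega, fun q => ⟨fun hq => ?_, fun hq => ?_⟩⟩
    · rw [pvRep_take_right, if_pos (by omega)]
    · rw [pvRep_take_right, if_neg (by omega)]

-- the cell written by A at window index idx (proof-only abbreviation)
def pvG (patt : PySem.Set (List Char)) (s : List Char) (o m : Int) (idx : Int) : Char :=
  if 2 ≤ idx then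
    (if PySem.Set.contains patt
        [pvRep s o (m - 7 + idx), pvRep s o (m - 6 + idx), pvRep s o (m - 5 + idx),
          pvRep s o (m - 4 + idx), pvRep s o (m - 3 + idx)] = true then '#' else '.')
  else '.'

lemma pv_map_fst_pair (l : List Int) :
    (l.map (fun p => (p, ('#' : Char)))).map Prod.fst = l := by
  rw [List.map_map]
  have h : Prod.fst ∘ (fun p : Int => (p, ('#' : Char))) = fun p => p := rfl
  rw [h, List.map_id']

lemma pv_map_fst_pair' (l : List Int) :
    (l.map (fun p => (p, ('#' : Char)))).map (fun pc => pc.1) = l := by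
  rw [List.map_map]
  have h : ((fun pc : Int × Char => pc.1) ∘ fun p : Int => (p, ('#' : Char))) = fun p => p := rfl
  rw [h, List.map_id']

-- what one A-generation computes, expressed through pvRep only
lemma pv_next_gen_char (patt : PySem.Set (List Char)) (hp : [] ∉ patt)
    (s : List Char) (o : Int) (hs : '#' ∈ s) :
    ∃ m M : Int, m ≤ M ∧ pvRep s o m = '#' ∧ pvRep s o M = '#' ∧
      (∀ q, pvRep s o q = '#' → m ≤ q ∧ q ≤ M) ∧
      (calc_next_gen s patt o).2 = 5 - m ∧
      (calc_next_gen s patt o).1 = (PySem.List.pyRange 0 (M - m + 8) 1).map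
        (pvG patt s o m) := by
  simp only [calc_next_gen]
  obtain ⟨hf0, hflen, hfget, hfmin⟩ := pv_find_char_spec s '#' hs
  obtain ⟨hL1, hOff1, hRep1⟩ := pv_front s o (PySem.Chars.find s ['#']) rfl hs
  set f := PySem.Chars.find s ['#'] with hf
  set pop1 := (if f < 5 then PySem.List.pyRepeat ['.'] (5 - f) ++ s
    else if f > 5 then PySem.List.slice s (some (f - 5)) none else s) with hpop1
  set off1 := (if f < 5 then o + (5 - f) else if f > 5 then o - (f - 5) else o) with hoff1
  have hm : pvRep s o (f - o) = '#' := by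
    unfold pvRep
    rw [if_pos (by omega)]
    have hcast : (f - o + o).toNat = f.toNat := by omega
    rw [hcast, hfget]
    rfl
  have hpop1m : '#' ∈ pop1 :=
    pvRep_mem_of_hash pop1 off1 (f - o) (by rw [(hRep1 (f - o)).1 (by omega)]; exact hm)
  obtain ⟨eN, heN, helt, heget, hemax⟩ := pv_rfind_char_spec pop1 '#' hpop1m
  obtain ⟨hL2, hRep2⟩ := pv_back pop1 off1 (PySem.Chars.rfind pop1 ['#']) rfl hpop1m
  set e := PySem.Chars.rfind pop1 ['#'] with he
  set pop2 := (if ((pop1.length : Int) - e - 1) < 5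
    then pop1 ++ PySem.List.pyRepeat ['.'] (5 - ((pop1.length : Int) - e - 1))
    else if ((pop1.length : Int) - e - 1) > 5
      then PySem.List.slice pop1 none (some (-(((pop1.length : Int) - e - 1) - 5)))
      else pop1) with hpop2
  have hrep_pop1 : ∀ q, pvRep pop1 off1 q = '#' → q + off1 ≤ e := by
    intro q hq
    unfold pvRep at hq
    by_cases h0 : 0 ≤ q + off1
    · rw [if_pos h0] at hq
      by_contra hgt
      have hx := hemax (q + off1).toNat (by omega)
      rcases hg : pop1[(q + off1).toNat]? with _ | c
      · rw [hg] at hq; exact absurd hq (by decide)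
      · rw [hg] at hq hx
        simp only [Option.getD_some] at hq
        exact hx (by rw [hq])
    · rw [if_neg h0] at hq; exact absurd hq (by decide)
  have he5 : 5 ≤ e := by
    have h1 : (f - o) + off1 ≤ e :=
      hrep_pop1 (f - o) (by rw [(hRep1 (f - o)).1 (by omega)]; exact hm)
    omega
  have hM : pvRep s o (e - off1) = '#' := by
    have h1 : pvRep pop1 off1 (e - off1) = '#' := by
      unfold pvRep
      rw [if_pos (by omega)]
      have hcast : (e - off1 + off1).toNat = eN := by omega
      rw [hcast, heget]
      rfl
    have h2 := (hRep1 (e - off1)).1 (by omega)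
    rw [h2] at h1
    exact h1
  have hbnd : ∀ q, pvRep s o q = '#' → f - o ≤ q ∧ q ≤ e - off1 := by
    intro q hq
    have hlow : f ≤ q + o := by
      unfold pvRep at hq
      by_cases h0 : 0 ≤ q + o
      · rw [if_pos h0] at hq
        rcases hg : s[(q + o).toNat]? with _ | c
        · rw [hg] at hq; exact absurd hq (by decide)
        · rw [hg] at hq
          simp only [Option.getD_some] at hq
          by_contra hlt
          exact hfmin (q + o).toNat (by omega) (by rw [hg, hq])
      · rw [if_neg h0] at hq; exact absurd hq (by decide)
    have hup : q + off1 ≤ e := by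
      apply hrep_pop1
      rw [(hRep1 q).1 (by omega)]
      exact hq
    exact ⟨by omega, by omega⟩
  refine ⟨f - o, e - off1, by have := hbnd (f - o) hm; omega, hm, hM, hbnd, by
    show off1 = 5 - (f - o); omega, ?_⟩
  have hbox : ∀ q, f - o - 5 ≤ q → q ≤ e - off1 + 5 → pvRep pop2 off1 q = pvRep s o q := by
    intro q h1 h2
    rw [(hRep2 q).1 (by omega)]
    exact (hRep1 q).1 (by omega)
  have hwin : ∀ x : Int, 0 ≤ x → x ≤ e + 5 →
      (pop2[x.toNat]?).getD '.' = pvRep s o (x - off1) := by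
    intro x hx0 hx1
    have h1 : pvRep pop2 off1 (x - off1) = (pop2[x.toNat]?).getD '.' := by
      unfold pvRep
      rw [if_pos (by omega)]
      have hcast : (x - off1 + off1).toNat = x.toNat := by omega
      rw [hcast]
    rw [← h1, hbox _ (by omega) (by omega)]
  show (PySem.List.pyRange 0 ((pop2.length : Int) - 3) 1).foldl _ [] = _
  rw [show ((pop2.length : Int) - 3) = (e - off1) - (f - o) + 8 from by omega]
  have hbody : (fun (acc : List Char) (idx : Int) =>
      if PySem.Set.contains patt (PySem.List.slice pop2 (some (idx - 2)) (some (idx + 3))) = true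
      then acc ++ ['#'] else acc ++ ['.'])
      = fun acc idx => acc ++ [if PySem.Set.contains patt
          (PySem.List.slice pop2 (some (idx - 2)) (some (idx + 3))) = true then '#' else '.'] := by
    funext acc idx
    split <;> rfl
  rw [hbody, PySem.List.foldl_append_singleton_eq_map, List.nil_append]
  apply List.map_congr_left
  intro idx hidx
  rw [PySem.List.mem_pyRange_one] at hidx
  unfold pvG
  by_cases h2i : 2 ≤ idx
  · rw [if_pos h2i]
    rw [show (idx + 3) = (idx - 2) + 5 from by ring]
    rw [pv_slice5 pop2 (idx - 2) (by omega) (by omega)]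
    rw [hwin (idx - 2) (by omega) (by omega), hwin (idx - 2 + 1) (by omega) (by omega),
      hwin (idx - 2 + 2) (by omega) (by omega), hwin (idx - 2 + 3) (by omega) (by omega),
      hwin (idx - 2 + 4) (by omega) (by omega)]
    rw [show idx - 2 - off1 = (f - o) - 7 + idx from by omega,
      show idx - 2 + 1 - off1 = (f - o) - 6 + idx from by omega,
      show idx - 2 + 2 - off1 = (f - o) - 5 + idx from by omega,
      show idx - 2 + 3 - off1 = (f - o) - 4 + idx from by omega,
      show idx - 2 + 4 - off1 = (f - o) - 3 + idx from by omega]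
  · rw [if_neg h2i]
    have hcases : idx = 0 ∨ idx = 1 := by omega
    have hlen5 : 5 ≤ pop2.length := by omega
    rcases hcases with rfl | rfl
    · rw [show ((0 : Int) - 2) = -((2 : Nat) : Int) from by norm_num,
        show ((0 : Int) + 3) = ((3 : Nat) : Int) from by norm_num,
        pv_slice_neg_empty pop2 2 3 (by norm_num) (by omega),
        pv_contains_nil_false patt hp]
      rfl
    · rw [show ((1 : Int) - 2) = -((1 : Nat) : Int) from by norm_num,
        show ((1 : Int) + 3) = ((4 : Nat) : Int) from by norm_num,
        pv_slice_neg_empty pop2 1 4 (by norm_num) (by omega),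
        pv_contains_nil_false patt hp]
      rfl

-- a dead tape stays dead in A
lemma pv_next_gen_dead (patt : PySem.Set (List Char)) (hp : [] ∉ patt)
    (s : List Char) (o : Int) (hs : '#' ∉ s) :
    calc_next_gen s patt o = (List.replicate 2 '.', o + 6) := by
  simp only [calc_next_gen]
  have hfind : PySem.Chars.find s ['#'] = -1 := pv_find_char_neg s '#' hs
  rw [hfind]
  have hpop1 : (if (-1 : Int) < 5 then PySem.List.pyRepeat ['.'] (5 - -1) ++ s
      else if (-1 : Int) > 5 then PySem.List.slice s (some (-1 - 5)) none else s)
      = List.replicate 6 '.' ++ s := by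
    rw [if_pos (by norm_num), PySem.List.pyRepeat_singleton]
    norm_num
    rfl
  have hoff1 : (if (-1 : Int) < 5 then o + (5 - -1)
      else if (-1 : Int) > 5 then o - (-1 - 5) else o) = o + 6 := by
    rw [if_pos (by norm_num)]
    norm_num
  rw [hpop1, hoff1]
  have hmem : '#' ∉ List.replicate 6 '.' ++ s := by
    intro h
    rcases List.mem_append.1 h with h | h
    · exact absurd (List.eq_of_mem_replicate h) (by decide)
    · exact hs h
  have hrf : PySem.Chars.rfind (List.replicate 6 '.' ++ s) ['#'] = -1 :=
    pv_rfind_char_neg _ '#' hmem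
  rw [hrf]
  have hlen : (((List.replicate 6 '.' ++ s).length : Int)) = (s.length : Int) + 6 := by
    simp
    omega
  rw [hlen]
  have hpop2 : (if ((s.length : Int) + 6 - -1 - 1) < 5
      then (List.replicate 6 '.' ++ s) ++ PySem.List.pyRepeat ['.'] (5 - ((s.length : Int) + 6 - -1 - 1))
      else if ((s.length : Int) + 6 - -1 - 1) > 5
        then PySem.List.slice (List.replicate 6 '.' ++ s) none (some (-(((s.length : Int) + 6 - -1 - 1) - 5)))
        else List.replicate 6 '.' ++ s)
      = List.replicate 5 '.' := by
    rw [if_neg (by omega), if_pos (by omega)]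
    have hkey : -((s.length : Int) + 6 - -1 - 1 - 5) = -(((s.length + 1 : Nat)) : Int) := by omega
    rw [hkey, PySem.List.slice_to_neg_natCast _ _ (by omega)]
    have h5 : (List.replicate 6 '.' ++ s).length - (s.length + 1) = 5 := by
      simp
    rw [h5, List.take_append_of_le_length (by simp), List.take_replicate]
    norm_num
  rw [hpop2]
  have hrange : PySem.List.pyRange 0 (((List.replicate 5 '.' : List Char).length : Int) - 3) 1
      = [0, 1] := by decide
  rw [hrange]
  simp only [List.foldl_cons, List.foldl_nil]
  rw [show ((0 : Int) - 2) = -((2 : Nat) : Int) from by norm_num,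
    show ((0 : Int) + 3) = ((3 : Nat) : Int) from by norm_num,
    pv_slice_neg_empty _ 2 3 (by norm_num) (by simp),
    show ((1 : Int) - 2) = -((1 : Nat) : Int) from by norm_num,
    show ((1 : Int) + 3) = ((4 : Nat) : Int) from by norm_num,
    pv_slice_neg_empty _ 1 4 (by norm_num) (by simp),
    pv_contains_nil_false patt hp]
  rfl

-- one generation: invariant is preserved and the recorded sums agree
lemma pv_step_sim (patt : PySem.Set (List Char)) (hp : [] ∉ patt)
    (s : List Char) (o : Int) (cells : PySem.Dict Int Char) (hInv : pvInv s o cells) :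
    pvInv (calc_next_gen s patt o).1 (calc_next_gen s patt o).2 (pvStepB cells patt)
      ∧ calc_sum (calc_next_gen s patt o).1 (calc_next_gen s patt o).2
          = pvSumB (pvStepB cells patt) := by
  obtain ⟨hnd, hrep⟩ := hInv
  have hcell_val : ∀ pc : Int × Char, pc ∈ cells.items → cells.getD pc.1 '.' = pc.2 := by
    intro pc hpc
    exact pv_getD_mk_of_mem hnd hpc '.'
  have hlive_iff : ∀ p : Int,
      (p ∈ (cells.items.filter (fun pc => pc.2 == '#')).map (fun pc => pc.1)) ↔
        pvRep s o p = '#' := by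
    intro p
    constructor
    · intro hpm
      rcases List.mem_map.1 hpm with ⟨pc, hpcf, rfl⟩
      have h2 := List.mem_filter.1 hpcf
      have h3 := hcell_val pc h2.1
      have h4 : pc.2 = '#' := by simpa using h2.2
      rw [← hrep pc.1, h3, h4]
    · intro hq
      have h1 : cells.getD p '.' = '#' := by rw [hrep p]; exact hq
      unfold PySem.Dict.getD at h1
      rcases hf : cells.get? p with _ | v
      · rw [hf] at h1; exact absurd h1 (by decide)
      · rw [hf] at h1
        simp only [Option.getD_some] at h1
        unfold PySem.Dict.get? at hf
        rcases hff : cells.items.find? (fun q => q.1 == p) with _ | pc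
        · rw [hff] at hf; simp at hf
        · rw [hff] at hf
          simp only [Option.map_some] at hf
          have hmem := List.mem_of_find?_eq_some hff
          have hpred := List.find?_some hff
          have hk : pc.1 = p := by simpa using hpred
          have hv : pc.2 = '#' := by
            have : pc.2 = v := by simpa using hf
            rw [this, h1]
          exact List.mem_map.2 ⟨pc, List.mem_filter.2 ⟨hmem, by simp [hv]⟩, hk⟩
  by_cases hs : '#' ∈ s
  · obtain ⟨m, M, hmM, hmh, hMh, hbnd, hsnd, hfst⟩ := pv_next_gen_char patt hp s o hs
    rw [hfst, hsnd]
    simp only [pvStepB]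
    have hmemL : m ∈ (cells.items.filter (fun pc => pc.2 == '#')).map (fun pc => pc.1) :=
      (hlive_iff m).2 hmh
    have hLne : (cells.items.filter (fun pc => pc.2 == '#')).map (fun pc => pc.1) ≠ [] :=
      List.ne_nil_of_mem hmemL
    rw [if_neg (by simpa [List.isEmpty_iff] using hLne)]
    rcases hmin : PySem.List.min? ((cells.items.filter (fun pc => pc.2 == '#')).map (fun pc => pc.1))
        (fun x => x) with _ | lo
    · rw [PySem.List.min?_eq_none_iff] at hmin
      exact absurd hmin hLne
    rcases hmax : PySem.List.max? ((cells.items.filter (fun pc => pc.2 == '#')).map (fun pc => pc.1))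
        (fun x => x) with _ | hi
    · rw [PySem.List.max?_eq_none_iff] at hmax
      exact absurd hmax hLne
    have hlo : lo = m := by
      have h1 : m ≤ lo := (hbnd lo ((hlive_iff lo).1 (PySem.List.min?_mem hmin))).1
      have h2 : lo ≤ m := PySem.List.min?_isMin hmin m hmemL
      omega
    have hhi : hi = M := by
      have h1 : hi ≤ M := (hbnd hi ((hlive_iff hi).1 (PySem.List.max?_mem hmax))).2
      have h2 : m ≤ hi ∧ M ≤ hi := ⟨(hbnd hi ((hlive_iff hi).1 (PySem.List.max?_mem hmax))).1,
        PySem.List.max?_isMax hmax M ((hlive_iff M).2 hMh)⟩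
      omega
    rw [hmin, hmax]
    simp only [Option.getD_some]
    rw [hlo, hhi]
    have hfold : (PySem.List.pyRange (m - 3) (M + 3) 1).foldl
        (fun d p => if PySem.Set.contains patt (pvWindow cells p) = true
          then d.insert p '#' else d) PySem.Dict.empty
        = (⟨((PySem.List.pyRange (m - 3) (M + 3) 1).filter
            (fun p => PySem.Set.contains patt (pvWindow cells p))).map
              (fun p => (p, '#'))⟩ : PySem.Dict Int Char) := by
      have h1 : (PySem.List.pyRange (m - 3) (M + 3) 1).foldl
          (fun d p => if PySem.Set.contains patt (pvWindow cells p) = true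
            then d.insert p '#' else d) PySem.Dict.empty
          = ((PySem.List.pyRange (m - 3) (M + 3) 1).map (fun p => (p, ('#' : Char)))).foldl
            (fun d ic => if PySem.Set.contains patt (pvWindow cells ic.1) = true
              then d.insert ic.1 ic.2 else d) PySem.Dict.empty := by
        rw [List.foldl_map]
      rw [h1]
      apply PySem.Dict.ext
      rw [show (PySem.Dict.empty : PySem.Dict Int Char) = (⟨[]⟩ : PySem.Dict Int Char) from rfl]
      rw [pv_foldl_insert_items (fun ic => PySem.Set.contains patt (pvWindow cells ic.1) = true)
        _ [] (by rw [pv_map_fst_pair]; exact PySem.List.nodup_pyRange_one (m - 3) (M + 3))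
        (by simp)]
      simp only [List.nil_append, List.filter_map]
      have hcomp : ((fun ic : Int × Char =>
          decide (PySem.Set.contains patt (pvWindow cells ic.1) = true)) ∘
            (fun p : Int => (p, ('#' : Char))))
          = fun p => PySem.Set.contains patt (pvWindow cells p) := by
        funext p
        simp
      rw [hcomp]
    rw [hfold]
    constructor
    · constructor
      · show ((((PySem.List.pyRange (m - 3) (M + 3) 1).filter
            (fun p => PySem.Set.contains patt (pvWindow cells p))).map
              (fun p => (p, ('#' : Char)))).map Prod.fst).Nodup
        rw [pv_map_fst_pair]
        exact (PySem.List.nodup_pyRange_one (m - 3) (M + 3)).filter _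
      · intro p
        rw [pv_rep_map_pyRange]
        have hndF : ((((PySem.List.pyRange (m - 3) (M + 3) 1).filter
            (fun p => PySem.Set.contains patt (pvWindow cells p))).map
              (fun p => (p, ('#' : Char)))).map Prod.fst).Nodup := by
          rw [pv_map_fst_pair]
          exact (PySem.List.nodup_pyRange_one (m - 3) (M + 3)).filter _
        by_cases hj : 0 ≤ p + (5 - m) ∧ p + (5 - m) < M - m + 8
        · rw [if_pos hj]
          unfold pvG
          by_cases h2 : 2 ≤ p + (5 - m)
          · rw [if_pos h2]
            rw [show m - 7 + (p + (5 - m)) = p - 2 from by ring,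
              show m - 6 + (p + (5 - m)) = p - 1 from by ring,
              show m - 5 + (p + (5 - m)) = p from by ring,
              show m - 4 + (p + (5 - m)) = p + 1 from by ring,
              show m - 3 + (p + (5 - m)) = p + 2 from by ring]
            have hwineq : [pvRep s o (p - 2), pvRep s o (p - 1), pvRep s o p,
                pvRep s o (p + 1), pvRep s o (p + 2)] = pvWindow cells p := by
              simp only [pvWindow_eq, hrep]
            rw [hwineq]
            by_cases hc : PySem.Set.contains patt (pvWindow cells p) = true
            · rw [if_pos hc]
              exact pv_getD_mk_of_mem hndF
                (List.mem_map_of_mem (List.mem_filter.2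
                  ⟨PySem.List.mem_pyRange_one.2 ⟨by omega, by omega⟩, hc⟩)) '.'
            · rw [if_neg hc]
              apply pv_getD_mk_of_not_mem
              rw [pv_map_fst_pair]
              intro hmemF
              exact hc (List.mem_filter.1 hmemF).2
          · rw [if_neg h2]
            apply pv_getD_mk_of_not_mem
            rw [pv_map_fst_pair]
            intro hmemF
            have := PySem.List.mem_pyRange_one.1 (List.mem_filter.1 hmemF).1
            omega
        · rw [if_neg hj]
          apply pv_getD_mk_of_not_mem
          rw [pv_map_fst_pair]
          intro hmemF
          have := PySem.List.mem_pyRange_one.1 (List.mem_filter.1 hmemF).1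
          omega
    · -- the recorded sums agree
      have hsumB : pvSumB (⟨((PySem.List.pyRange (m - 3) (M + 3) 1).filter
            (fun p => PySem.Set.contains patt (pvWindow cells p))).map
              (fun p => (p, '#'))⟩ : PySem.Dict Int Char)
          = ((PySem.List.pyRange (m - 3) (M + 3) 1).filter
              (fun p => PySem.Set.contains patt (pvWindow cells p))).sum := by
        simp only [pvSumB]
        rw [pv_map_fst_pair']
      rw [hsumB, pv_calc_sum_eq]
      rw [PySem.List.enumerate_eq_map_pyRange _ '.']
      have hlen : PySem.List.len ((PySem.List.pyRange 0 (M - m + 8) 1).map (pvG patt s o m))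
          = M - m + 8 := by
        simp only [PySem.List.len, List.length_map, PySem.List.length_pyRange_one]
        omega
      rw [hlen]
      have hmap2 : (PySem.List.pyRange 0 (M - m + 8) 1).map
            (fun j => (j, PySem.List.pyGetD
              ((PySem.List.pyRange 0 (M - m + 8) 1).map (pvG patt s o m)) j '.'))
          = (PySem.List.pyRange 0 (M - m + 8) 1).map (fun j => (j, pvG patt s o m j)) := by
        apply List.map_congr_left
        intro j hj
        rcases PySem.List.mem_pyRange_one.1 hj with ⟨hj0, hjN⟩
        rw [PySem.List.pyGetD_map_pyRange_of_nonneg _ _ _ _ hj0 hjN]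
      rw [hmap2]
      rw [List.filter_map, List.map_map]
      have hQ : ((fun ic : Int × Char => ic.2 == '#') ∘ (fun j : Int => (j, pvG patt s o m j)))
          = fun j => pvG patt s o m j == '#' := rfl
      have hH : ((fun ic : Int × Char => ic.1 - (5 - m)) ∘ (fun j : Int => (j, pvG patt s o m j)))
          = fun j => j - (5 - m) := rfl
      rw [hQ, hH]
      rw [PySem.List.pyRange_one_append 0 2 (M - m + 8) (by omega) (by omega),
        List.filter_append, List.map_append, List.sum_append]
      have h01 : (PySem.List.pyRange 0 2 1).filter (fun j => pvG patt s o m j == '#') = [] := by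
        rw [show PySem.List.pyRange 0 2 1 = [0, 1] from by decide]
        have hg0 : pvG patt s o m 0 = '.' := by unfold pvG; rw [if_neg (by norm_num)]
        have hg1 : pvG patt s o m 1 = '.' := by unfold pvG; rw [if_neg (by norm_num)]
        simp [hg0, hg1]
      rw [h01]
      simp only [List.map_nil, List.sum_nil, zero_add]
      have hshift : PySem.List.pyRange (m - 3) (M + 3) 1
          = (PySem.List.pyRange 2 (M - m + 8) 1).map (· + (m - 5)) := by
        rw [pv_pyRange_shift, show (2 : Int) + (m - 5) = m - 3 from by ring,
          show (M - m + 8) + (m - 5) = M + 3 from by ring]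
      rw [hshift, List.filter_map]
      have hcond_eq : ∀ j ∈ PySem.List.pyRange 2 (M - m + 8) 1,
          ((fun p => PySem.Set.contains patt (pvWindow cells p)) ∘ (· + (m - 5))) j
            = (pvG patt s o m j == '#') := by
        intro j hj
        rcases PySem.List.mem_pyRange_one.1 hj with ⟨hj2, hjN⟩
        show PySem.Set.contains patt (pvWindow cells (j + (m - 5))) = (pvG patt s o m j == '#')
        unfold pvG
        rw [if_pos hj2]
        rw [show m - 7 + j = (j + (m - 5)) - 2 from by ring,
          show m - 6 + j = (j + (m - 5)) - 1 from by ring,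
          show m - 5 + j = (j + (m - 5)) from by ring,
          show m - 4 + j = (j + (m - 5)) + 1 from by ring,
          show m - 3 + j = (j + (m - 5)) + 2 from by ring]
        have hwineq : [pvRep s o ((j + (m - 5)) - 2), pvRep s o ((j + (m - 5)) - 1),
            pvRep s o (j + (m - 5)), pvRep s o ((j + (m - 5)) + 1), pvRep s o ((j + (m - 5)) + 2)]
            = pvWindow cells (j + (m - 5)) := by
          simp only [pvWindow_eq, hrep]
        rw [hwineq]
        rcases hb : PySem.Set.contains patt (pvWindow cells (j + (m - 5))) with _ | _
        · rw [if_neg (by simp)]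
          decide
        · rw [if_pos (by simp)]
          decide
      rw [List.filter_congr hcond_eq]
      rw [show (fun j : Int => j - (5 - m)) = (fun j : Int => j + (m - 5)) from by funext j; ring]
  · rw [pv_next_gen_dead patt hp s o hs]
    have hLnil : (cells.items.filter (fun pc => pc.2 == '#')).map (fun pc => pc.1) = [] := by
      by_contra hne
      rcases List.exists_mem_of_ne_nil _ hne with ⟨p, hpm⟩
      exact hs (pvRep_mem_of_hash s o p ((hlive_iff p).1 hpm))
    simp only [pvStepB]
    rw [hLnil]
    rw [if_pos (by simp)]
    refine ⟨⟨by simp [PySem.Dict.empty], ?_⟩, ?_⟩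
    · intro p
      show '.' = pvRep (List.replicate 2 '.') (o + 6) p
      rw [pv_rep_replicate]
    · show calc_sum (List.replicate 2 '.') (o + 6) = 0
      rw [pv_calc_sum_eq]
      simp [PySem.List.enumerate]

-- a list indexed from the back is its reverse indexed from the front
lemma pv_getD_rev (l : List Int) (i k : Nat) (hl : l.length = i + 1) (hk : k ≤ i) :
    PySem.List.pyGetD l ((i : Int) - k) 0 = l.reverse[k]'(by simp [hl]; omega) := by
  have h1 : PySem.List.pyGetD l ((i : Int) - k) 0 = l[((i : Int) - k).toNat]'(by omega) := by
    rw [PySem.List.pyGetD_eq_getElem _ _ (by omega) (by omega)]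
  rw [h1, List.getElem_reverse]
  congr 1
  omega

-- headI of a nonempty list is its first element
lemma pv_headI_eq (l : List Int) (h : 0 < l.length) : l.headI = l[0] := by
  cases l with
  | nil => simp at h
  | cons a t => rfl

-- A's check on the appended sums list equals B's check on the pairwise differences
-- of the reversed list
lemma pv_check_eq (l : List Int) (i : Nat) (hl : l.length = i + 1) (hi : 100 ≤ i) :
    (List.zipWith (fun x y => x - y) (l.reverse.take 101) (l.reverse.drop 1)).headI
        = PySem.List.pyGetD l (i : Int) 0 - PySem.List.pyGetD l ((i : Int) - 1) 0
    ∧ ∀ dA : Int,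
      ((PySem.List.pyRange 0 100 1).all (fun j =>
          PySem.List.pyGetD l ((i : Int) - j) 0 - PySem.List.pyGetD l ((i : Int) - j - 1) 0 == dA))
        = (((List.zipWith (fun x y => x - y) (l.reverse.take 101) (l.reverse.drop 1)).take 100).all
            (fun d => d == dA)) := by
  have hrl : l.reverse.length = i + 1 := by simp [hl]
  have hdsl : (List.zipWith (fun x y : Int => x - y) (l.reverse.take 101) (l.reverse.drop 1)).length
      = min 101 i := by
    simp only [List.length_zipWith, List.length_take, List.length_drop, hrl]
    omega
  have hds_get : ∀ (k : Nat) (hk : k < 100),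
      (List.zipWith (fun x y : Int => x - y) (l.reverse.take 101)
          (l.reverse.drop 1))[k]'(by rw [hdsl]; omega)
        = l.reverse[k]'(by rw [hrl]; omega) - l.reverse[k + 1]'(by rw [hrl]; omega) := by
    intro k hk
    simp only [List.getElem_zipWith]
    rw [List.getElem_take, List.getElem_drop]
    simp only [Nat.add_comm 1 k]
  have hterm : ∀ (k : Nat) (hk : k < 100),
      PySem.List.pyGetD l ((i : Int) - k) 0 - PySem.List.pyGetD l ((i : Int) - k - 1) 0
        = (List.zipWith (fun x y : Int => x - y) (l.reverse.take 101)
            (l.reverse.drop 1))[k]'(by rw [hdsl]; omega) := by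
    intro k hk
    rw [hds_get k hk, pv_getD_rev l i k hl (by omega)]
    have hc : (i : Int) - k - 1 = (i : Int) - ((k + 1 : Nat) : Int) := by push_cast; ring
    rw [hc, pv_getD_rev l i (k + 1) hl (by omega)]
  constructor
  · have h00 := hterm 0 (by omega)
    have hpos : 0 < (List.zipWith (fun x y : Int => x - y) (l.reverse.take 101)
        (l.reverse.drop 1)).length := by rw [hdsl]; omega
    rw [pv_headI_eq _ hpos]
    simpa using h00.symm
  · intro dA
    rw [Bool.eq_iff_iff, List.all_eq_true, List.all_eq_true]
    constructor
    · intro hA d hd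
      rcases List.mem_iff_getElem.1 hd with ⟨k, hk, hdk⟩
      have hk100 : k < 100 := by simp only [List.length_take] at hk; omega
      have hdk' : (List.zipWith (fun x y : Int => x - y) (l.reverse.take 101)
          (l.reverse.drop 1))[k]'(by rw [hdsl]; omega) = d := by
        rw [← hdk, List.getElem_take]
      have hmem : ((k : Nat) : Int) ∈ PySem.List.pyRange 0 100 1 :=
        PySem.List.mem_pyRange_one.2 ⟨by omega, by omega⟩
      have hAk := hA _ hmem
      rw [← hdk', ← hterm k hk100]
      simpa using hAk
    · intro hB j hj
      rcases PySem.List.mem_pyRange_one.1 hj with ⟨hj0, hj100⟩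
      have hk100 : j.toNat < 100 := by omega
      have hjk : ((j.toNat : Nat) : Int) = j := by omega
      have hmem : (List.zipWith (fun x y : Int => x - y) (l.reverse.take 101)
          (l.reverse.drop 1))[j.toNat]'(by rw [hdsl]; omega)
          ∈ (List.zipWith (fun x y : Int => x - y) (l.reverse.take 101)
              (l.reverse.drop 1)).take 100 := by
        rw [List.mem_iff_getElem]
        exact ⟨j.toNat, by simp only [List.length_take, hdsl]; omega, by rw [List.getElem_take]⟩
      have hBk := hB _ hmem
      rw [← hjk, hterm j.toNat hk100]
      simpa using hBk

-- the last element of the sums list is the head of its reverse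
lemma pv_last_headI (l : List Int) :
    PySem.List.pyGetD l ((l.length : Int) - 1) 0 = l.reverse.headI := by
  cases l with
  | nil => decide
  | cons a t =>
    have h1 := pv_getD_rev (a :: t) t.length 0 (by simp) (by omega)
    have hpos : 0 < (a :: t).reverse.length := by simp
    have hc : (((a :: t).length : Int) - 1) = ((t.length : Int) - ((0 : Nat) : Int)) := by
      simp
    rw [hc, h1, pv_headI_eq _ hpos]

-- the driver loops agree: A's triple is (length of its sums, sums, diff) and
-- B's pair is (reverse of those sums, same diff)
lemma pv_run_sim (patt : PySem.Set (List Char)) (hp : [] ∉ patt) :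
    ∀ (fuel i : Nat) (s : List Char) (o : Int) (cells : PySem.Dict Int Char)
      (sums : List Int) (diff : Int), pvInv s o cells → i = sums.length →
      ∃ R D, pvRunA patt fuel i s o (sums.length : Int) sums diff = ((R.length : Int), R, D)
        ∧ pvRunB patt fuel i cells sums.reverse diff = (R.reverse, D) := by
  intro fuel
  induction fuel with
  | zero =>
    intro i s o cells sums diff _ _
    exact ⟨sums, diff, rfl, rfl⟩
  | succ fuel ih =>
    intro i s o cells sums diff hInv hi
    obtain ⟨hInv', hsum⟩ := pv_step_sim patt hp s o cells hInv
    simp only [pvRunA, pvRunB]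
    rw [← hsum]
    set v := calc_sum (calc_next_gen s patt o).1 (calc_next_gen s patt o).2 with hv
    have hrev : v :: sums.reverse = (sums ++ [v]).reverse := by simp
    have hlen' : (sums ++ [v]).length = sums.length + 1 := by simp
    have hcast : (sums.length : Int) + 1 = (((sums ++ [v]).length : Nat) : Int) := by
      rw [hlen']; push_cast; ring
    rw [hrev]
    by_cases h100 : 100 ≤ i
    · rw [if_pos h100, if_pos h100]
      obtain ⟨hhead, hall⟩ := pv_check_eq (sums ++ [v]) i (by rw [hlen']; omega) h100
      simp only [hhead]
      rw [← hall (PySem.List.pyGetD (sums ++ [v]) (i : Int) 0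
            - PySem.List.pyGetD (sums ++ [v]) ((i : Int) - 1) 0)]
      split_ifs with hfound
      · refine ⟨sums ++ [v], _, ?_, rfl⟩
        rw [hcast]
      · obtain ⟨R, D, hA, hB⟩ := ih (i + 1) (calc_next_gen s patt o).1 (calc_next_gen s patt o).2
          (pvStepB cells patt) (sums ++ [v]) _ hInv' (by rw [hlen']; omega)
        exact ⟨R, D, by rw [hcast]; exact hA, hB⟩
    · rw [if_neg h100, if_neg h100]
      obtain ⟨R, D, hA, hB⟩ := ih (i + 1) (calc_next_gen s patt o).1 (calc_next_gen s patt o).2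
        (pvStepB cells patt) (sums ++ [v]) diff hInv' (by rw [hlen']; omega)
      exact ⟨R, D, by rw [hcast]; exact hA, hB⟩

-- ===== VERDICT (by name: the statement is the Claim_ definition above) =====
theorem calc_sum_after_x_generations_spec : Claim_equal_calc_sum_after_x_generations := by
  intro my_input n hdom hpre
  unfold Spec_calc_sum_after_x_generations
  unfold calc_sum_after_x_generations calc_sum_after_x_generations_alt
  simp only [parse_input, get_spread_pattern]
  set lines := PySem.Chars.splitOn (PySem.Chars.strip my_input.toList) ['\n'] with hlines
  set line0 := lines.headI with hline0
  set start_idx := min (PySem.Chars.find line0 ['.']) (PySem.Chars.find line0 ['#']) with hstart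
  set init := PySem.List.slice line0 (some start_idx) none with hinit
  have hpatts : lines.foldl pvGspStep PySem.Set.empty
      = PySem.Set.ofList
          ((lines.filter pvPatOk).map (fun l => PySem.List.slice l (some 0) (some 5))) := by
    rw [pv_fold_patterns]
    rfl
  have hp : [] ∉ PySem.Set.ofList
      ((lines.filter pvPatOk).map (fun l => PySem.List.slice l (some 0) (some 5))) := by
    rw [← hpatts]
    exact pv_patterns_no_empty lines PySem.Set.empty (by simp)
  rw [hpatts]
  set patt := PySem.Set.ofList
    ((lines.filter pvPatOk).map (fun l => PySem.List.slice l (some 0) (some 5))) with hpatt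
  set cells0 := (PySem.List.enumerate init 0).foldl
    (fun d ic => if ic.2 ≠ '.' then d.insert ic.1 ic.2 else d) PySem.Dict.empty with hcells
  obtain ⟨R, D, hA, hB⟩ := pv_run_sim patt hp n.toNat 0 init 0 cells0 [] 0
    (by rw [hcells]; exact pv_init_inv init) (by simp)
  simp only [List.length_nil, Nat.cast_zero] at hA
  simp only [List.reverse_nil] at hB
  rw [hA, hB]
  simp only [List.length_reverse, pv_last_headI]
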